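-- pv_equiv track=rewrite | github.com/tigerthelion/advent-of-code-2019 | 4.py | adjacency_check
-- ===== SOURCE A (Python) =====
-- def adjacency_check(sequence):
--     sequence = str(sequence)
--     seq_len = len(sequence)
--
--     chains = []
--     chain = sequence[0]
--     counter = 1
--     while counter < seq_len:
--         next_digit = sequence[counter]
--
--         if next_digit == chain[-1]:
--             chain += next_digit
--         else:
--             chains.append(chain)
--             chain = next_digit
--
--         counter+=1
--         cur_digit = next_digit
--     chains.append(chain)
--
--
--     for chain in chains:
--         if len(chain) == 2:
--             return True
--
--     return False
-- ===== SOURCE B (Python) =====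
-- def adjacency_check(sequence):
--     s = str(sequence)
--     n = len(s)
--     i = 0
--     while i + 1 < n:
--         if s[i] == s[i + 1] and (i == 0 or s[i - 1] != s[i]) and (i + 2 >= n or s[i + 2] != s[i + 1]):
--             return True
--         i += 1
--     return False
-- ===== Notes on version B (the rewrite author's own statement) =====
-- stated objective: alternative
-- what changed: B replaces A's run-accumulation (building the full list of adjacent-equal chains, then scanning it for one of length exactly two) with a single early-returning windowed index scan that detects a run of length exactly two at its start via lookback/lookahead comparisons, never materializing any run.
import Mathlib
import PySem

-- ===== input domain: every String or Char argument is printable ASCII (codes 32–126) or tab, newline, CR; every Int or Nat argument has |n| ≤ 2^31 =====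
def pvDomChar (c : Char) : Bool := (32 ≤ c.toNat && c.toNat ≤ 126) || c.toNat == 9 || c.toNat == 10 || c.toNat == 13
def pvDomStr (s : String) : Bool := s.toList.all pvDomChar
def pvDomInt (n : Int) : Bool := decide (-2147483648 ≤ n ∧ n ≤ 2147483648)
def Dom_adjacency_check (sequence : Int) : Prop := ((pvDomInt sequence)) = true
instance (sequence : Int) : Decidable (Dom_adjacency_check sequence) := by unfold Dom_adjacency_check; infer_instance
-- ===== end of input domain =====

-- B is an alternative to A: a windowed index scan with early return instead of
-- accumulating the list of adjacent-equal chains and scanning it for one of length exactly two.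

-- ===== PORT A =====
-- the while loop of A: state (chains, chain, counter), walks counter up to s.length
def adjLoop (s : List Char) (chains : List (List Char)) (chain : List Char) (counter : Nat) :
    List (List Char) :=
  if _h : counter < s.length then
    let next := s.getD counter ' '
    if next == chain.getLastD ' ' then
      adjLoop s chains (chain ++ [next]) (counter + 1)
    else
      adjLoop s (chains ++ [chain]) [next] (counter + 1)
  else
    chains ++ [chain]
termination_by s.length - counter

def adjacency_check (sequence : Int) : Bool :=
  let s := (PySem.Int.toStr sequence).toList
  -- sequence[0]: str(int) is never empty, so the Python indexing cannot raise
  let chains := adjLoop s [] [s.getD 0 ' '] 1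
  chains.any (fun c => c.length == 2)

-- ===== PORT B =====
-- B's while loop: scan index i; a run of length exactly two is detected at its start
def bScan (s : List Char) (i : Nat) : Bool :=
  if _h : i + 1 < s.length then
    if (s.getD i ' ' == s.getD (i + 1) ' ')
        && (decide (i = 0) || !(s.getD (i - 1) ' ' == s.getD i ' '))
        && (decide (s.length ≤ i + 2) || !(s.getD (i + 2) ' ' == s.getD (i + 1) ' ')) then
      true
    else
      bScan s (i + 1)
  else
    false
termination_by s.length - i

def adjacency_check_alt (sequence : Int) : Bool :=
  bScan ((PySem.Int.toStr sequence).toList) 0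

-- ===== PRECONDITION & SPEC =====
def Spec_adjacency_check (sequence : Int) (out : Bool) : Prop := out = adjacency_check_alt sequence
instance (sequence : Int) (out : Bool) : Decidable (Spec_adjacency_check sequence out) := by unfold Spec_adjacency_check; infer_instance

-- ===== CLAIM (what is proved, stated in full; the proofs are below) =====
def Claim_equal_adjacency_check : Prop := ∀ (sequence : Int), Dom_adjacency_check sequence → Spec_adjacency_check sequence (adjacency_check sequence)

-- ===== LEMMAS AND PROOFS =====

-- common spec: does some maximal run of equal adjacent chars have length exactly two?
def hs : List Char → Bool
  | [] => false
  | a :: rest =>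
      ((rest.takeWhile (· == a)).length == 1) || hs (rest.dropWhile (· == a))
termination_by l => l.length
decreasing_by
  exact Nat.lt_succ_of_le (List.length_dropWhile_le _ _)

-- structural version of A's loop (remaining input, current chain)
def runsAny : List Char → List Char → Bool
  | [], chain => chain.length == 2
  | d :: rest, chain =>
      if d == chain.getLastD ' ' then runsAny rest (chain ++ [d])
      else (chain.length == 2) || runsAny rest [d]

-- structural version of B's scan (remaining input, previous char if any)
def scanB : List Char → Option Char → Bool
  | a :: b :: rest, p =>
      if (a == b) && !(p == some a) && !(rest.head? == some b) then true
      else scanB (b :: rest) (some a)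
  | _, _ => false

theorem hs_nil : hs [] = false := by rw [hs.eq_def]

theorem hs_cons (a : Char) (rest : List Char) :
    hs (a :: rest)
      = (((rest.takeWhile (· == a)).length == 1) || hs (rest.dropWhile (· == a))) := by
  rw [hs.eq_def]

theorem scanB_short (l : List Char) (p : Option Char) (h : l.length ≤ 1) : scanB l p = false := by
  match l with
  | [] => rfl
  | [a] => rfl
  | a :: b :: r => simp at h

theorem adjLoop_any (s : List Char) :
    ∀ n counter chains chain, s.length - counter ≤ n →
      ((adjLoop s chains chain counter).any (fun c => c.length == 2))
        = (chains.any (fun c => c.length == 2) || runsAny (s.drop counter) chain) := by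
  intro n
  induction n with
  | zero =>
    intro counter chains chain h
    have hge : s.length ≤ counter := by omega
    rw [adjLoop]
    simp [Nat.not_lt_of_le hge, List.drop_eq_nil_of_le hge, runsAny, List.any_append]
  | succ n ih =>
    intro counter chains chain h
    rw [adjLoop]
    by_cases hlt : counter < s.length
    · have hdrop : s.drop counter = s[counter] :: s.drop (counter + 1) :=
        List.drop_eq_getElem_cons hlt
      have hgetD : s.getD counter ' ' = s[counter] := List.getD_eq_getElem s ' ' hlt
      have hn : s.length - (counter + 1) ≤ n := by omega
      simp only [hlt, dif_pos, hgetD]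
      by_cases heq : (s[counter] == chain.getLastD ' ') = true
      · rw [if_pos heq, ih _ _ _ hn, hdrop]
        simp only [runsAny]
        rw [if_pos heq]
      · rw [if_neg heq, ih _ _ _ hn, hdrop]
        simp only [runsAny]
        rw [if_neg heq]
        simp [List.any_append, Bool.or_assoc]
    · have hge : s.length ≤ counter := by omega
      simp [hlt, List.drop_eq_nil_of_le hge, runsAny, List.any_append]

theorem bScan_eq_scanB (s : List Char) :
    ∀ n i, s.length - i ≤ n →
      bScan s i = scanB (s.drop i) (if i = 0 then none else some (s.getD (i - 1) ' ')) := by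
  intro n
  induction n with
  | zero =>
    intro i h
    have hge : s.length ≤ i := by omega
    rw [bScan]
    have : ¬ (i + 1 < s.length) := by omega
    rw [dif_neg this, List.drop_eq_nil_of_le hge, scanB_short _ _ (by simp)]
  | succ n ih =>
    intro i h
    rw [bScan]
    by_cases hlt : i + 1 < s.length
    · have hi : i < s.length := by omega
      have hdrop : s.drop i = s[i] :: s.drop (i + 1) := List.drop_eq_getElem_cons hi
      have hdrop1 : s.drop (i + 1) = s[i + 1] :: s.drop (i + 2) := List.drop_eq_getElem_cons hlt
      have g0 : s.getD i ' ' = s[i] := List.getD_eq_getElem s ' ' hi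
      have g1 : s.getD (i + 1) ' ' = s[i + 1] := List.getD_eq_getElem s ' ' hlt
      rw [dif_pos hlt, hdrop, hdrop1, scanB]
      have hcond :
          ((s.getD i ' ' == s.getD (i + 1) ' ')
              && (decide (i = 0) || !(s.getD (i - 1) ' ' == s.getD i ' '))
              && (decide (s.length ≤ i + 2) || !(s.getD (i + 2) ' ' == s.getD (i + 1) ' ')))
            = ((s[i] == s[i + 1])
                && !((if i = 0 then none else some (s.getD (i - 1) ' ')) == some (s[i]))
                && !((s.drop (i + 2)).head? == some (s[i + 1]))) := by
        rw [g0, g1]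
        congr 1
        · congr 1
          by_cases h0 : i = 0
          · subst h0
            simp
          · simp only [h0]
            simp
        · by_cases h2 : s.length ≤ i + 2
          · simp [h2, List.drop_eq_nil_of_le h2]
          · have h2' : i + 2 < s.length := by omega
            have hdrop2 : s.drop (i + 2) = s[i + 2] :: s.drop (i + 3) :=
              List.drop_eq_getElem_cons h2'
            simp only [h2, hdrop2, List.head?_cons,
              List.getD_eq_getElem s ' ' h2', Option.some_beq_some]
            simp
      rw [hcond]
      by_cases hc : ((s[i] == s[i + 1])
                && !((if i = 0 then none else some (s.getD (i - 1) ' ')) == some (s[i]))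
                && !((s.drop (i + 2)).head? == some (s[i + 1]))) = true
      · rw [if_pos hc, if_pos hc]
      · rw [if_neg hc, if_neg hc]
        have hn : s.length - (i + 1) ≤ n := by omega
        rw [ih _ hn, hdrop1, if_neg (Nat.succ_ne_zero i)]
        simp only [Nat.add_sub_cancel, g0]
    · rw [dif_neg hlt]
      have hlen : (s.drop i).length ≤ 1 := by
        simp [List.length_drop]; omega
      rw [scanB_short _ _ hlen]

theorem getLastD_replicate (k : Nat) (c : Char) (hk : 1 ≤ k) :
    (List.replicate k c).getLastD ' ' = c := by
  match k, hk with
  | (m + 1), _ =>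
    rw [List.getLastD_eq_getLast?, List.getLast?_replicate]
    simp

theorem runsAny_run (c : Char) :
    ∀ (j : Nat) (rest : List Char) (k : Nat), 1 ≤ k → rest.head? ≠ some c →
      runsAny (List.replicate j c ++ rest) (List.replicate k c)
        = ((k + j == 2) || (match rest with | [] => false | d :: r2 => runsAny r2 [d])) := by
  intro j
  induction j with
  | zero =>
    intro rest k hk hh
    match rest with
    | [] => simp [runsAny]
    | d :: r2 =>
      have hd : ¬ (d == c) = true := by
        simp only [beq_iff_eq]; intro h; exact hh (by simp [h])
      simp only [List.replicate, List.nil_append, runsAny, getLastD_replicate k c hk]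
      rw [if_neg hd]
      simp [List.length_replicate]
  | succ j ih =>
    intro rest k hk hh
    have : List.replicate (j + 1) c ++ rest = c :: (List.replicate j c ++ rest) := by
      simp [List.replicate_succ]
    rw [this, runsAny]
    rw [if_pos (show (c == (List.replicate k c).getLastD ' ') = true by
      rw [getLastD_replicate k c hk]; exact beq_self_eq_true c)]
    have : List.replicate k c ++ [c] = List.replicate (k + 1) c := by
      rw [← List.replicate_succ']
    rw [this, ih rest (k + 1) (by omega) hh]
    have : (k + 1 + j) = (k + (j + 1)) := by omega
    rw [this]

theorem scanB_inside (a : Char) :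
    ∀ (m : Nat) (rest : List Char), 1 ≤ m → rest.head? ≠ some a →
      scanB (List.replicate m a ++ rest) (some a) = scanB rest (some a) := by
  intro m
  induction m with
  | zero => intro rest h; omega
  | succ m ih =>
    intro rest _ hh
    match m, ih with
    | 0, _ =>
      match rest with
      | [] => rfl
      | d :: r2 =>
        have hd : ¬ (a == d) = true := by
          simp only [beq_iff_eq]; intro h; exact hh (by simp [h.symm])
        simp only [List.replicate, List.nil_append, List.cons_append, scanB]
        rw [if_neg (by simp [hd])]
    | (m' + 1), ih =>
      have hexp : List.replicate (m' + 2) a ++ rest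
          = a :: (List.replicate (m' + 1) a ++ rest) := by
        simp [List.replicate_succ]
      have hexp2 : List.replicate (m' + 1) a ++ rest
          = a :: (List.replicate m' a ++ rest) := by
        simp [List.replicate_succ]
      rw [hexp, hexp2, scanB]
      rw [if_neg (by simp)]
      rw [← hexp2, ih rest (by omega) hh]

theorem scanB_run (a : Char) :
    ∀ (j : Nat) (rest : List Char) (p : Option Char), 1 ≤ j → rest.head? ≠ some a →
      p ≠ some a →
      scanB (List.replicate j a ++ rest) p = ((j == 2) || scanB rest (some a)) := by
  intro j rest p hj hh hp
  match j, hj with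
  | 1, _ =>
    match rest with
    | [] => simp [scanB]
    | d :: r2 =>
      have hd : ¬ (a == d) = true := by
        simp only [beq_iff_eq]; intro h; exact hh (by simp [h.symm])
      simp only [List.replicate, List.nil_append, List.cons_append, scanB]
      rw [if_neg (by simp [hd])]
      simp
  | 2, _ =>
    have hexp : List.replicate 2 a ++ rest = a :: a :: rest := by
      simp [List.replicate]
    rw [hexp, scanB]
    rw [if_pos ?_]
    · simp
    · have h2 : (p == some a) = false := beq_eq_false_iff_ne.mpr hp
      have h3 : (rest.head? == some a) = false := beq_eq_false_iff_ne.mpr hh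
      simp [h2, h3]
  | (m + 3), _ =>
    have hexp : List.replicate (m + 3) a ++ rest
        = a :: a :: (List.replicate (m + 1) a ++ rest) := by
      simp [List.replicate_succ]
    rw [hexp, scanB]
    rw [if_neg ?_]
    · have : a :: (List.replicate (m + 1) a ++ rest)
          = List.replicate (m + 2) a ++ rest := by
        simp [List.replicate_succ]
      rw [this, scanB_inside a (m + 2) rest (by omega) hh]
      simp
    · have : (List.replicate (m + 1) a ++ rest).head? = some a := by
        simp [List.replicate_succ]
      simp [this]

theorem takeWhile_eq_replicate (a : Char) (l : List Char) :
    l.takeWhile (· == a) = List.replicate (l.takeWhile (· == a)).length a := by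
  apply List.eq_replicate_of_mem
  intro b hb
  have := List.mem_takeWhile_imp hb
  simpa [beq_iff_eq] using this

theorem head?_dropWhile (a : Char) (l : List Char) :
    (l.dropWhile (· == a)).head? ≠ some a := by
  intro h
  have := List.head?_dropWhile_not (p := (· == a)) (l := l)
  rw [h] at this
  simp at this

-- A's structural loop computes the spec
theorem runsAny_eq_hs :
    ∀ (n : Nat) (l : List Char), l.length ≤ n →
      (match l with | [] => false | d :: r2 => runsAny r2 [d]) = hs l := by
  intro n
  induction n with
  | zero =>
    intro l h
    match l with
    | [] => rw [hs_nil]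
    | d :: r2 => simp at h
  | succ n ih =>
    intro l h
    match l with
    | [] => rw [hs_nil]
    | d :: r2 =>
      have hsplit : r2 = r2.takeWhile (· == d) ++ r2.dropWhile (· == d) :=
        (List.takeWhile_append_dropWhile).symm
      have hrep := takeWhile_eq_replicate d r2
      have hh := head?_dropWhile d r2
      have h1 : runsAny r2 [d]
          = ((1 + (r2.takeWhile (· == d)).length == 2)
              || (match r2.dropWhile (· == d) with
                  | [] => false | e :: r3 => runsAny r3 [e])) := by
        conv_lhs => rw [hsplit, hrep]
        have : [d] = List.replicate 1 d := rfl
        rw [this, runsAny_run d _ _ 1 (by omega) hh]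
      show runsAny r2 [d] = hs (d :: r2)
      rw [h1, ih (r2.dropWhile (· == d))
        (by
          have := List.length_dropWhile_le (p := (· == d)) (l := r2)
          simp only [List.length_cons] at h
          omega)]
      rw [hs_cons]
      congr 1
      have : (1 + (r2.takeWhile (· == d)).length == 2)
          = ((r2.takeWhile (· == d)).length == 1) := by
        rcases k : (r2.takeWhile (· == d)).length with _ | _ | m <;> simp <;> omega
      rw [this]

-- B's structural scan computes the spec
theorem scanB_eq_hs :
    ∀ (n : Nat) (l : List Char) (p : Option Char), l.length ≤ n → p ≠ l.head? →
      scanB l p = hs l := by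
  intro n
  induction n with
  | zero =>
    intro l p h _
    match l with
    | [] => rw [scanB_short _ _ (by simp), hs_nil]
    | d :: r2 => simp at h
  | succ n ih =>
    intro l p h hp
    match l with
    | [] => rw [scanB_short _ _ (by simp), hs_nil]
    | d :: r2 =>
      have hsplit : d :: r2
          = List.replicate ((r2.takeWhile (· == d)).length + 1) d
              ++ r2.dropWhile (· == d) := by
        rw [List.replicate_succ]
        conv_lhs => rw [← List.takeWhile_append_dropWhile (p := (· == d)) (l := r2)]
        rw [takeWhile_eq_replicate d r2]
        simp
      have hh := head?_dropWhile d r2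
      have hpd : p ≠ some d := by simpa using hp
      conv_lhs => rw [hsplit]
      rw [scanB_run d _ _ p (by omega) hh hpd]
      rw [ih (r2.dropWhile (· == d)) (some d)
        (by
          have := List.length_dropWhile_le (p := (· == d)) (l := r2)
          simp only [List.length_cons] at h
          omega)
        (Ne.symm hh)]
      rw [hs_cons]
      congr 1
      rcases k : (r2.takeWhile (· == d)).length with _ | _ | m <;> simp

-- ===== VERDICT (by name: the statement is the Claim_ definition above) =====
theorem adjacency_check_spec : Claim_equal_adjacency_check := by
  intro sequence _
  unfold Spec_adjacency_check adjacency_check adjacency_check_alt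
  cases hl : (PySem.Int.toStr sequence).toList with
  | nil =>
    rw [adjLoop_any [] 0 1 [] _ (by simp)]
    rw [bScan_eq_scanB [] 0 0 (by simp)]
    rw [scanB_short _ _ (by simp)]
    simp [runsAny]
  | cons a rest =>
    simp only [List.getD_cons_zero]
    have hA : (adjLoop (a :: rest) [] [a] 1).any (fun c => c.length == 2)
        = runsAny rest [a] := by
      rw [adjLoop_any (a :: rest) ((a :: rest).length) 1 [] [a] (by omega)]
      simp
    have hB : bScan (a :: rest) 0 = scanB (a :: rest) none := by
      rw [bScan_eq_scanB (a :: rest) ((a :: rest).length) 0 (by omega)]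
      simp
    rw [hA, hB]
    rw [scanB_eq_hs ((a :: rest).length) (a :: rest) none (by omega) (by simp)]
    exact runsAny_eq_hs ((a :: rest).length) (a :: rest) (by omega)
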